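-- pv_equiv track=rewrite | github.com/LucyIvatt/Advent-of-Code-22 | 10 Syntax Scoring/Main.py | find_autocomplete_strings
-- ===== SOURCE A (Python) =====
-- OPENING_CHARS = ["(", "[", "{", "<"]
--
-- CLOSING_CHARS = [")", "]", "}", ">"]
--
-- def find_autocomplete_strings(valid_lines):
--     autocomplete_strings = []
--     for line in valid_lines:
--         autocomplete_string = ""
--         opening_sequence = []
--         for char in line:
--             if char in OPENING_CHARS:
--                 opening_sequence.append(char)
--             else:
--                 del opening_sequence[-1]
--
--         for opening_char in reversed(opening_sequence):
--             autocomplete_string += CLOSING_CHARS[OPENING_CHARS.index(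
--                 opening_char)]
--         autocomplete_strings.append(autocomplete_string)
--     return autocomplete_strings
-- ===== SOURCE B (Python) =====
-- CLOSER_OF = {"(": ")", "[": "]", "{": "}", "<": ">"}
--
-- def _complete(line):
--     # Scan right-to-left with an integer debt counter: a non-opener adds one
--     # unit of debt, an opener first pays debt off, and only a debt-free opener
--     # emits its closing character -- already in autocomplete order, so no
--     # stack, no reversal and no second mapping pass are needed.
--     result = ""
--     debt = 0
--     for char in reversed(line):
--         closer = CLOSER_OF.get(char)
--         if closer is None:
--             debt += 1
--         elif debt:
--             debt -= 1
--         else: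
--             result += closer
--     if debt:
--         # leftover debt = a closing character with no opener: the line is corrupt
--         raise ValueError("line closes a bracket that was never opened")
--     return result
--
-- def find_autocomplete_strings(valid_lines):
--     return [_complete(line) for line in valid_lines]
-- ===== Notes on version B (the rewrite author's own statement) =====
-- stated objective: alternative
-- what changed: B scans each line right-to-left with a single integer debt counter instead of A's stack: each non-opener adds one unit of debt, an opener first pays debt off, and only a debt-free (i.e. unmatched) opener emits its closing character, which arrives already in autocomplete order - no stack, no reversal and no second mapping pass; leftover debt means a closer with no opener, which B rejects as corrupt input.
import Mathlib
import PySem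

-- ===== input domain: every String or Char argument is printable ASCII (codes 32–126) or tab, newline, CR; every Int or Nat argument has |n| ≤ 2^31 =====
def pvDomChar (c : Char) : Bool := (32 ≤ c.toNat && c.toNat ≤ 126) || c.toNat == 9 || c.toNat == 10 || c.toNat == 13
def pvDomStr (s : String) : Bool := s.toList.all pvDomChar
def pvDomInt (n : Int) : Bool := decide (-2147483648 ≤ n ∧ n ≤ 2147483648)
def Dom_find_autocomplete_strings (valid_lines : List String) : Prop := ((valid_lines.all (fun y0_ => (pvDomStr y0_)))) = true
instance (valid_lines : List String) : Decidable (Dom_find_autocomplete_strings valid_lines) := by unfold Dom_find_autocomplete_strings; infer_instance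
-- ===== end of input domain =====

-- B replaces A's stack simulation by a right-to-left scan with an integer debt counter that
-- emits closers for unmatched openers directly in output order; same cost, different algorithm.


-- ===== PORT A =====
def OPENING_CHARS : List Char := ['(', '[', '{', '<']
def CLOSING_CHARS : List Char := [')', ']', '}', '>']

-- one step of A's scan: push openers, 'del opening_sequence[-1]' otherwise
-- (none = the IndexError of 'del' on an empty list; excluded by Pre_)
def stepA (st : Option (List Char)) (c : Char) : Option (List Char) :=
  match st with
  | none => none
  | some seq =>
      if c ∈ OPENING_CHARS then some (seq ++ [c])
      else if seq = [] then none else some seq.dropLast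

-- CLOSING_CHARS[OPENING_CHARS.index(opening_char)]  (the stack only ever holds openers)
def closeOf (c : Char) : Char :=
  match PySem.List.index? OPENING_CHARS c with
  | some i => (PySem.List.pyGet? CLOSING_CHARS (Int.ofNat i)).getD ' '
  | none => ' '

def lineA (line : String) : String :=
  match line.toList.foldl stepA (some []) with
  | some seq => String.ofList (seq.reverse.foldl (fun acc oc => acc ++ [closeOf oc]) [])
  | none => ""   -- unreachable under Pre_ (Python raises IndexError here)

def find_autocomplete_strings (valid_lines : List String) : List String :=
  valid_lines.foldl (fun acc line => acc ++ [lineA line]) []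

-- ===== PORT B =====
def CLOSER_OF : PySem.Dict Char Char :=
  PySem.Dict.mk [('(', ')'), ('[', ']'), ('{', '}'), ('<', '>')]

-- one step of B's reverse scan: a non-opener adds debt, an opener pays debt or emits its closer
def stepB (st : List Char × Int) (c : Char) : List Char × Int :=
  match PySem.Dict.get? CLOSER_OF c with
  | none => (st.1, st.2 + 1)
  | some closer => if st.2 ≠ 0 then (st.1, st.2 - 1) else (st.1 ++ [closer], st.2)

def lineB (line : String) : String :=
  let st := line.toList.reverse.foldl stepB ([], 0)
  if st.2 ≠ 0 then ""   -- unreachable under Pre_ (Python raises ValueError on leftover debt)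
  else String.ofList st.1

def find_autocomplete_strings_alt (valid_lines : List String) : List String :=
  valid_lines.map lineB

-- ===== PRECONDITION & SPEC =====
-- Pre_ excludes exactly the inputs on which A raises IndexError (a non-opening character read
-- while its scanned stack is empty, i.e. a line prefix with more non-openers than openers).
def Pre_find_autocomplete_strings (valid_lines : List String) : Prop :=
  ∀ line ∈ valid_lines, ∀ n ≤ line.toList.length,
    (line.toList.take n).countP (fun c => !(c ∈ OPENING_CHARS : Bool)) ≤
    (line.toList.take n).countP (fun c => (c ∈ OPENING_CHARS : Bool))
instance (valid_lines : List String) : Decidable (Pre_find_autocomplete_strings valid_lines) := by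
  unfold Pre_find_autocomplete_strings; infer_instance

def pvWitness_find_autocomplete_strings : List String := ["([{<", "([)]", ""]

def Spec_find_autocomplete_strings (valid_lines : List String) (out : List String) : Prop := out = find_autocomplete_strings_alt valid_lines
instance (valid_lines : List String) (out : List String) : Decidable (Spec_find_autocomplete_strings valid_lines out) := by unfold Spec_find_autocomplete_strings; infer_instance

-- ===== CLAIM (what is proved, stated in full; the proofs are below) =====
def Claim_equal_find_autocomplete_strings : Prop := ∀ (valid_lines : List String), Dom_find_autocomplete_strings valid_lines → Pre_find_autocomplete_strings valid_lines → Spec_find_autocomplete_strings valid_lines (find_autocomplete_strings valid_lines)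

-- ===== LEMMAS AND PROOFS =====

-- Nat-debt version of B's step used by the proofs (B's port carries a Python int)
def gN (c : Char) (st : List Char × Nat) : List Char × Nat :=
  if c ∈ OPENING_CHARS then
    (if st.2 = 0 then (st.1 ++ [closeOf c], 0) else (st.1, st.2 - 1))
  else (st.1, st.2 + 1)

-- B's dict lookup agrees with A's list test and maps each opener to closeOf
lemma closer_get_eq (c : Char) :
    PySem.Dict.get? CLOSER_OF c = if c ∈ OPENING_CHARS then some (closeOf c) else none := by
  by_cases h1 : c = '('
  · subst h1; decide
  by_cases h2 : c = '['
  · subst h2; decide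
  by_cases h3 : c = '{'
  · subst h3; decide
  by_cases h4 : c = '<'
  · subst h4; decide
  simp [CLOSER_OF, OPENING_CHARS, h1, h2, h3, h4,
    Ne.symm h1, Ne.symm h2, Ne.symm h3, Ne.symm h4, PySem.Dict.get?]

-- B's Int-state fold is the Nat-state fold
lemma foldrB_eq_gN (cs : List Char) :
    cs.foldr (fun c st => stepB st c) ([], 0) =
      ((cs.foldr gN ([], 0)).1, ((cs.foldr gN ([], 0)).2 : Int)) := by
  induction cs with
  | nil => rfl
  | cons c cs ih =>
      rw [List.foldr_cons, List.foldr_cons, ih]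
      simp only [stepB, gN, closer_get_eq c]
      by_cases h : c ∈ OPENING_CHARS
      · by_cases hd : (cs.foldr gN ([], 0)).2 = 0
        · simp [h, hd]
        · have : ((cs.foldr gN ([], 0)).2 : Int) ≠ 0 := by exact_mod_cast hd
          simp only [h, hd, this, if_true, if_false, ite_not]
          refine Prod.ext rfl ?_
          simp
          omega
      · simp [h]

lemma foldl_stepA_none (cs : List Char) : cs.foldl stepA none = none := by
  induction cs with
  | nil => rfl
  | cons c cs ih => simpa [stepA] using ih

-- branch-reduction helpers for the two step functions
lemma gN_open {c : Char} (h : c ∈ OPENING_CHARS) (st : List Char × Nat) :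
    gN c st = if st.2 = 0 then (st.1 ++ [closeOf c], 0) else (st.1, st.2 - 1) := by
  simp [gN, h]

lemma gN_close {c : Char} (h : c ∉ OPENING_CHARS) (st : List Char × Nat) :
    gN c st = (st.1, st.2 + 1) := by
  simp [gN, h]

lemma stepA_open {c : Char} (h : c ∈ OPENING_CHARS) (s : List Char) :
    stepA (some s) c = some (s ++ [c]) := by
  simp [stepA, h]

lemma stepA_close {c : Char} (h : c ∉ OPENING_CHARS) (s : List Char) :
    stepA (some s) c = if s = [] then none else some s.dropLast := by
  simp [stepA, h]

-- the heart: A's scanned stack (reversed, mapped to closers) against B's (output, debt) pair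
lemma main_rel (cs : List Char) (s : List Char) :
    (cs.foldl stepA (some s)).map (fun t => t.reverse.map closeOf) =
      (if (cs.foldr gN ([], 0)).2 ≤ s.length
       then some ((cs.foldr gN ([], 0)).1 ++
              (s.take (s.length - (cs.foldr gN ([], 0)).2)).reverse.map closeOf)
       else none) := by
  induction cs generalizing s with
  | nil => simp
  | cons c cs ih =>
      rw [List.foldl_cons, List.foldr_cons]
      by_cases h : c ∈ OPENING_CHARS
      · rw [stepA_open h, gN_open h]
        have hthis := ih (s ++ [c])
        rcases hd : (cs.foldr gN ([], 0)).2 with _ | k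
        · rw [hd] at hthis
          rw [hthis]
          simp [List.append_assoc]
        · rw [hd] at hthis
          simp only [Nat.succ_ne_zero, Nat.add_sub_cancel, ite_false]
          by_cases hk : k ≤ s.length
          · rw [if_pos hk, if_pos (by simp; omega)] at *
            rw [hthis]
            have he : s.length + 1 - (k + 1) = s.length - k := by omega
            have ht : (s ++ [c]).take (s.length - k) = s.take (s.length - k) :=
              List.take_append_of_le_length (by omega)
            simp only [List.length_append, List.length_cons, List.length_nil, he, ht]
          · rw [if_neg hk, if_neg (by simp; omega)] at *
            exact hthis
      · rw [stepA_close h, gN_close h]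
        rcases s with _ | ⟨x, s'⟩
        · simp [foldl_stepA_none]
        · rw [if_neg (by simp)]
          have hthis := ih (x :: s').dropLast
          rw [hthis]
          have hlen : (x :: s').dropLast.length = s'.length := by simp
          rw [hlen]
          by_cases hk : (cs.foldr gN ([], 0)).2 ≤ s'.length
          · rw [if_pos hk, if_pos (by simp; omega)]
            have h1 : (x :: s').length - ((cs.foldr gN ([], 0)).2 + 1)
                = s'.length - (cs.foldr gN ([], 0)).2 := by
              simp only [List.length_cons]; omega
            have h2 : (x :: s').dropLast.take (s'.length - (cs.foldr gN ([], 0)).2)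
                = (x :: s').take (s'.length - (cs.foldr gN ([], 0)).2) := by
              rw [List.dropLast_eq_take, List.take_take]
              congr 1
              simp only [List.length_cons, Nat.add_sub_cancel]
              omega
            rw [h1, h2]
          · rw [if_neg hk, if_neg (by simp; omega)]

-- the prefix-count precondition means A's scan never underflows
lemma no_underflow (cs : List Char) (s : List Char)
    (h : ∀ n ≤ cs.length,
      (cs.take n).countP (fun c => !(c ∈ OPENING_CHARS : Bool)) ≤
      (cs.take n).countP (fun c => (c ∈ OPENING_CHARS : Bool)) + s.length) :
    cs.foldl stepA (some s) ≠ none := by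
  induction cs generalizing s with
  | nil => simp
  | cons c cs ih =>
      simp only [List.foldl_cons, stepA]
      by_cases hc : c ∈ OPENING_CHARS
      · rw [if_pos hc]
        refine ih (s ++ [c]) ?_
        intro n hn
        have := h (n + 1) (by simpa using Nat.succ_le_succ hn)
        simp [List.take_succ_cons, hc] at this ⊢
        omega
      · rw [if_neg hc]
        have hs : s ≠ [] := by
          intro he
          have := h 1 (by simp)
          simp [List.take_succ_cons, hc, he] at this
        rw [if_neg hs]
        refine ih s.dropLast ?_
        intro n hn
        have := h (n + 1) (by simpa using Nat.succ_le_succ hn)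
        have hlen : s.dropLast.length = s.length - 1 := by simp
        rw [hlen]
        have hsl : 1 ≤ s.length := by
          cases s with | nil => exact absurd rfl hs | cons _ _ => simp
        simp only [List.take_succ_cons, List.countP_cons, hc] at this
        simp at this ⊢
        omega

-- A's second loop is a map
lemma build_eq_map (l : List Char) :
    l.foldl (fun acc oc => acc ++ [closeOf oc]) [] = l.map closeOf := by
  rw [PySem.List.foldl_append_singleton_eq_map]; simp

lemma line_eq (line : String)
    (h : ∀ n ≤ line.toList.length,
      (line.toList.take n).countP (fun c => !(c ∈ OPENING_CHARS : Bool)) ≤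
      (line.toList.take n).countP (fun c => (c ∈ OPENING_CHARS : Bool))) :
    lineA line = lineB line := by
  unfold lineA lineB
  have hnu := no_underflow line.toList []
    (by intro n hn; simpa using h n hn)
  have hmr := main_rel line.toList []
  rw [List.foldl_reverse, foldrB_eq_gN]
  rcases hfa : line.toList.foldl stepA (some []) with _ | t
  · exact absurd hfa hnu
  · rw [hfa] at hmr
    simp only [List.length_nil] at hmr
    by_cases hd : (line.toList.foldr gN ([], 0)).2 ≤ 0
    · rw [if_pos hd] at hmr
      simp only [Option.map_some, List.take_nil, List.reverse_nil, List.map_nil,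
        List.append_nil, Option.some.injEq] at hmr
      have hz : (line.toList.foldr gN ([], 0)).2 = 0 := Nat.le_zero.mp hd
      simp only [hz, Nat.cast_zero, ne_eq, not_true_eq_false, if_false]
      rw [← hmr]
      exact congrArg String.ofList (build_eq_map t.reverse)
    · rw [if_neg hd] at hmr
      simp at hmr

-- ===== VERDICT (by name: the statement is the Claim_ definition above) =====
theorem find_autocomplete_strings_spec : Claim_equal_find_autocomplete_strings := by
  intro valid_lines _ hpre
  unfold Spec_find_autocomplete_strings find_autocomplete_strings find_autocomplete_strings_alt
  rw [PySem.List.foldl_append_singleton_eq_map]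
  exact List.map_congr_left (fun line hl => line_eq line (hpre line hl))
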